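-- pv_equiv track=rewrite | github.com/asusilo17/VehicleDetection | Model/ocrProcess.py | correct_ocr_plate_dynamic
-- ===== SOURCE A (Python) =====
-- def correct_ocr_plate_dynamic(plate):
--     if not plate:
--         return plate
--
--     # Peta koreksi karakter OCR yang sering salah
--     ocr_correction_map = {
--         '0': 'O',
--         '1': 'I',
--         '2': 'Z',
--         '5': 'S',
--         '8': 'B'
--     }
--
--     # Mulai dari belakang dan cari karakter terakhir yang bukan huruf
--     i = len(plate) - 1
--     while i >= 0 and (plate[i].isalpha() or plate[i].isdigit()):
--         i -= 1
--
--     # Bagian depan = sebelum i+1, bagian belakang (kemungkinan huruf) = setelah i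
--     number_part = plate[:i+1]
--     letter_part = plate[i+1:]
--
--     # Koreksi hanya di letter_part
--     corrected_letter_part = ''.join(ocr_correction_map.get(ch, ch) for ch in letter_part)
--
--     return number_part + corrected_letter_part
-- ===== SOURCE B (Python) =====
-- def correct_ocr_plate_dynamic(plate):
--     ocr_correction_map = {
--         '0': 'O',
--         '1': 'I',
--         '2': 'Z',
--         '5': 'S',
--         '8': 'B'
--     }
--     out = []
--     in_suffix = True
--     for ch in reversed(plate):
--         if in_suffix and (ch.isalpha() or ch.isdigit()):
--             out.append(ocr_correction_map.get(ch, ch))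
--         else:
--             in_suffix = False
--             out.append(ch)
--     return ''.join(reversed(out))
-- ===== Notes on version B (the rewrite author's own statement) =====
-- stated objective: alternative
-- what changed: Single reversed pass with an in_suffix state flag that corrects characters on the fly, instead of first scanning backwards for the suffix boundary index and then slicing and mapping the suffix separately.
import Mathlib
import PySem

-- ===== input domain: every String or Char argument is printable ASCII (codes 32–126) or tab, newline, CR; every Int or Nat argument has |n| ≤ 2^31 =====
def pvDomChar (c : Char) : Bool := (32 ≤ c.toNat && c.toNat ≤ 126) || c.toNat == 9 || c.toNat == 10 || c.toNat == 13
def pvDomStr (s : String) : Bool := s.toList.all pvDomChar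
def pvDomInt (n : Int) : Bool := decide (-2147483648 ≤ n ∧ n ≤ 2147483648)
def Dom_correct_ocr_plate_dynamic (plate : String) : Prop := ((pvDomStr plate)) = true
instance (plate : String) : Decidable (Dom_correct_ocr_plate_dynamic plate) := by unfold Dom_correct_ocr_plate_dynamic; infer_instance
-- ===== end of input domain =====

-- B is an alternative decomposition: one reversed pass with a state flag instead of
-- boundary-index scan + slice + map; equivalence of the RETURN value is proved below.

-- ===== PORT A =====

-- the ocr_correction_map dict literal
def pvOcrMap : PySem.Dict Char Char :=
  ((((PySem.Dict.empty.insert '0' 'O').insert '1' 'I').insert '2' 'Z').insert '5' 'S').insert '8' 'B'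

-- plate[i].isalpha() or plate[i].isdigit()  (i is always in range when reached)
def pvAlnumAt (cs : List Char) (i : Int) : Bool :=
  match PySem.List.pyGet? cs i with
  | some c => PySem.Chars.isalpha c || PySem.Chars.isdigit c
  | none => false

-- the while loop: i -= 1 while i >= 0 and plate[i] is a letter or digit
def pvLoopA (cs : List Char) (i : Int) : Int :=
  if 0 ≤ i ∧ pvAlnumAt cs i then pvLoopA cs (i - 1) else i
termination_by (i + 1).toNat
decreasing_by omega

def correct_ocr_plate_dynamic (plate : String) : String :=
  let cs := plate.toList
  if cs.isEmpty then plate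
  else
    let i := pvLoopA cs ((cs.length : Int) - 1)
    let number_part := PySem.List.slice cs none (some (i + 1))
    let letter_part := PySem.List.slice cs (some (i + 1)) none
    let corrected_letter_part := letter_part.map (fun ch => pvOcrMap.getD ch ch)
    String.ofList (number_part ++ corrected_letter_part)

-- ===== PORT B =====

-- the for-loop over reversed(plate) with the in_suffix flag (list built front-to-back)
def pvGoB : List Char → Bool → List Char
  | [], _ => []
  | ch :: t, true =>
      if PySem.Chars.isalpha ch || PySem.Chars.isdigit ch then
        pvOcrMap.getD ch ch :: pvGoB t true
      else
        ch :: pvGoB t false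
  | ch :: t, false => ch :: pvGoB t false

def correct_ocr_plate_dynamic_alt (plate : String) : String :=
  String.ofList (pvGoB plate.toList.reverse true).reverse

-- ===== PRECONDITION & SPEC =====
def Spec_correct_ocr_plate_dynamic (plate : String) (out : String) : Prop := out = correct_ocr_plate_dynamic_alt plate
instance (plate : String) (out : String) : Decidable (Spec_correct_ocr_plate_dynamic plate out) := by unfold Spec_correct_ocr_plate_dynamic; infer_instance

-- ===== CLAIM (what is proved, stated in full; the proofs are below) =====
def Claim_equal_correct_ocr_plate_dynamic : Prop := ∀ (plate : String), Dom_correct_ocr_plate_dynamic plate → Spec_correct_ocr_plate_dynamic plate (correct_ocr_plate_dynamic plate)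

-- ===== LEMMAS AND PROOFS =====

def pvAlnum (c : Char) : Bool := PySem.Chars.isalpha c || PySem.Chars.isdigit c

lemma pvGoB_false (t : List Char) : pvGoB t false = t := by
  induction t with
  | nil => rfl
  | cons c t ih => simp [pvGoB, ih]

lemma pvGoB_true (r : List Char) :
    pvGoB r true = (r.takeWhile pvAlnum).map (fun ch => pvOcrMap.getD ch ch) ++ r.dropWhile pvAlnum := by
  induction r with
  | nil => rfl
  | cons c t ih =>
    by_cases h : pvAlnum c
    · simp only [pvAlnum] at h
      simp [pvGoB, h, ih, pvAlnum]
    · simp only [pvAlnum] at h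
      simp [pvGoB, h, pvGoB_false, pvAlnum]

lemma pvAlnumAt_append_lt (ys : List Char) (c : Char) (i : Int)
    (h0 : 0 ≤ i) (h : i < ys.length) : pvAlnumAt (ys ++ [c]) i = pvAlnumAt ys i := by
  unfold pvAlnumAt
  have hg : PySem.List.pyGet? (ys ++ [c]) i = PySem.List.pyGet? ys i := by
    simp only [PySem.List.pyGet?, PySem.List.pyIdx?, List.length_append, List.length_cons,
      List.length_nil, zero_add, Nat.cast_add, Nat.cast_one]
    rw [if_pos h0, if_pos h0, if_pos (by omega : i < (ys.length : Int) + 1), if_pos h]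
    simp only [Option.bind_some]
    exact List.getElem?_append_left (by omega)
  rw [hg]

lemma pvLoopA_append_lt (ys : List Char) (c : Char) (i : Int) (h : i < ys.length) :
    pvLoopA (ys ++ [c]) i = pvLoopA ys i := by
  rcases Int.lt_or_le i 0 with hneg | hpos
  · conv_lhs => rw [pvLoopA]
    conv_rhs => rw [pvLoopA]
    simp [show ¬ (0 ≤ i) by omega]
  · conv_lhs => rw [pvLoopA]
    conv_rhs => rw [pvLoopA]
    rw [pvAlnumAt_append_lt ys c i hpos h]
    split
    · exact pvLoopA_append_lt ys c (i - 1) (by omega)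
    · rfl
termination_by (i + 1).toNat
decreasing_by omega

lemma pvLoopA_eq (cs : List Char) :
    pvLoopA cs ((cs.length : Int) - 1)
      = (cs.length : Int) - 1 - (cs.reverse.takeWhile pvAlnum).length := by
  induction cs using List.reverseRecOn with
  | nil => rw [pvLoopA]; simp
  | append_singleton ys c ih =>
    have hlen : (((ys ++ [c]).length : Int)) - 1 = (ys.length : Int) := by simp
    rw [hlen, pvLoopA]
    have hget : pvAlnumAt (ys ++ [c]) (ys.length : Int) = pvAlnum c := by
      unfold pvAlnumAt
      have hl : PySem.List.pyGet? (ys ++ [c]) (ys.length : Int) = some c := by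
        simp [PySem.List.pyGet?, PySem.List.pyIdx?]
      rw [hl]; rfl
    rw [hget]
    by_cases h : pvAlnum c
    · simp only [h, and_true, Int.natCast_nonneg, if_pos trivial]
      rw [pvLoopA_append_lt ys c _ (by omega), ih]
      simp only [List.reverse_append, List.reverse_singleton, List.singleton_append,
        List.takeWhile_cons, h, if_pos, List.length_cons]
      push_cast
      omega
    · simp [h]

lemma pv_take_drop_of_split (a b l : List Char) (h : l = a ++ b) :
    l.take (l.length - b.length) = a ∧ l.drop (l.length - b.length) = b := by
  subst h
  have hn : (a ++ b).length - b.length = a.length := by simp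
  rw [hn, List.take_left, List.drop_left]
  exact ⟨rfl, rfl⟩

-- ===== VERDICT (by name: the statement is the Claim_ definition above) =====
theorem correct_ocr_plate_dynamic_spec : Claim_equal_correct_ocr_plate_dynamic := by
  intro plate _
  unfold Spec_correct_ocr_plate_dynamic correct_ocr_plate_dynamic correct_ocr_plate_dynamic_alt
  rw [pvGoB_true]
  by_cases hE : plate.toList.isEmpty
  · have h0 : plate.toList = [] := by simpa [List.isEmpty_iff] using hE
    rw [if_pos hE]
    simp only [h0, List.reverse_nil, List.takeWhile_nil, List.dropWhile_nil, List.map_nil,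
      List.append_nil]
    rw [← h0, String.ofList_toList]
  · rw [if_neg hE]
    have hk : (plate.toList.reverse.takeWhile pvAlnum).length ≤ plate.toList.length := by
      calc (plate.toList.reverse.takeWhile pvAlnum).length
          ≤ plate.toList.reverse.length := (List.takeWhile_prefix pvAlnum).length_le
        _ = plate.toList.length := List.length_reverse
    rw [pvLoopA_eq plate.toList]
    dsimp only
    have harg : ((plate.toList.length : Int)) - 1 - ((plate.toList.reverse.takeWhile pvAlnum).length : Int) + 1
        = ((plate.toList.length - (plate.toList.reverse.takeWhile pvAlnum).length : Nat) : Int) := by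
      omega
    rw [harg, PySem.List.slice_to_natCast, PySem.List.slice_from_natCast]
    have hsplit : plate.toList
        = (plate.toList.reverse.dropWhile pvAlnum).reverse ++ (plate.toList.reverse.takeWhile pvAlnum).reverse := by
      conv_lhs => rw [← List.reverse_reverse plate.toList,
        ← List.takeWhile_append_dropWhile (p := pvAlnum) (l := plate.toList.reverse)]
      rw [List.reverse_append]
    have hpair := pv_take_drop_of_split _ _ _ hsplit
    rw [List.length_reverse] at hpair
    rw [hpair.1, hpair.2]
    congr 1
    rw [List.map_reverse, List.reverse_append]
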